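-- pv_equiv track=rewrite | github.com/AlyonkaB/puzzle | puzzle.py | graph_dict
-- ===== SOURCE A (Python) =====
-- def graph_dict(sequence_number: list[int]):
--     graph = {}
--     for number in sequence_number:
--         str_number = str(number)
--         start, end = str_number[:2], str_number[-2:]
--
--         if start not in graph:
--             graph[start] = []
--         graph[start].append((number, end))
--     return graph
-- ===== SOURCE B (Python) =====
-- def graph_dict(sequence_number: list[int]):
--     # Alternative decomposition: collect the distinct two-char prefixes first
--     # (in first-appearance order), then build each bucket with one filter pass.
--     key = lambda n: str(n)[:2]
--     graph = {}
--     for prefix in dict.fromkeys(key(n) for n in sequence_number):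
--         graph[prefix] = [(n, str(n)[-2:]) for n in sequence_number if key(n) == prefix]
--     return graph
-- ===== Notes on version B (the rewrite author's own statement) =====
-- stated objective: alternative
-- what changed: Replaces A's single hash-accumulation pass (create-bucket-if-absent, append) with a two-phase grouping: dedup the two-char prefixes in first-appearance order, then build each bucket by filtering the sequence per prefix.
import Mathlib
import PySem

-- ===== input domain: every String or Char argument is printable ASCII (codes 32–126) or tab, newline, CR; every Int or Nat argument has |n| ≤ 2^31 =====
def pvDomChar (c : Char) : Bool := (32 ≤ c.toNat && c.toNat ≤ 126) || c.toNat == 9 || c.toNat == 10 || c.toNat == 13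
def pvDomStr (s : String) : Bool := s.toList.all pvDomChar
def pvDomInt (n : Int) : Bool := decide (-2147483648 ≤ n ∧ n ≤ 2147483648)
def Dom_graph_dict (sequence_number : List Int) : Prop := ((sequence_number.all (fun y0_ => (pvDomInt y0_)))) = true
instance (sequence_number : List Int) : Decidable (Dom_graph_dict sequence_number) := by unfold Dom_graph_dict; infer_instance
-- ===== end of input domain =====

-- B groups by the deduplicated prefixes with one filter pass per prefix, instead of A's single dict-accumulation pass; same return value.

-- ===== PORT A =====
-- str(number)[:2] and str(number)[-2:]
def pvPrefix (n : Int) : String := PySem.Str.slice (PySem.Int.toStr n) none (some 2)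
def pvSuffix (n : Int) : String := PySem.Str.slice (PySem.Int.toStr n) (some (-2)) none

def graph_dict (sequence_number : List Int) : List (String × List (Int × String)) :=
  (sequence_number.foldl
    (fun graph number =>
      let start := pvPrefix number
      let e := pvSuffix number
      let graph := if graph.contains start then graph else graph.insert start []
      graph.modify start [] (fun l => l ++ [(number, e)]))
    PySem.Dict.empty).items

-- ===== PORT B =====
def graph_dict_alt (sequence_number : List Int) : List (String × List (Int × String)) :=
  (PySem.Set.ofList (sequence_number.map (fun n => pvPrefix n))).foldl
    (fun graph pfx =>
      graph ++ [(pfx,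
        (sequence_number.filter (fun n => pvPrefix n == pfx)).map
          (fun n => (n, pvSuffix n)))])
    []

-- ===== PRECONDITION & SPEC =====
def Spec_graph_dict (sequence_number : List Int) (out : List (String × List (Int × String))) : Prop := out = graph_dict_alt sequence_number
instance (sequence_number : List Int) (out : List (String × List (Int × String))) : Decidable (Spec_graph_dict sequence_number out) := by unfold Spec_graph_dict; infer_instance

-- ===== CLAIM (what is proved, stated in full; the proofs are below) =====
def Claim_equal_graph_dict : Prop := ∀ (sequence_number : List Int), Dom_graph_dict sequence_number → Spec_graph_dict sequence_number (graph_dict sequence_number)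

-- ===== LEMMAS AND PROOFS =====

-- A's loop body (insert-an-empty-bucket-if-absent, then append) is exactly Dict.modify with default [].
theorem pv_step_eq (d : PySem.Dict String (List (Int × String))) (k : String)
    (g : List (Int × String) → List (Int × String)) :
    (if d.contains k then d else d.insert k []).modify k [] g = d.modify k [] g := by
  by_cases h : d.contains k = true
  · simp [h]
  · simp only [h, Bool.false_eq_true, if_false, PySem.Dict.modify]
    rw [PySem.Dict.getD_insert_self, PySem.Dict.insert_insert_self,
        show d.getD k [] = [] from PySem.Dict.getD_of_not_contains d [] (by simp only [Bool.not_eq_true] at h; exact h)]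

-- A's fold is the keyed modify-append fold over the (prefix, (number, suffix)) pairs.
theorem pv_fold_eq (sequence_number : List Int) :
    sequence_number.foldl
      (fun graph number =>
        let start := pvPrefix number
        let e := pvSuffix number
        let graph := if graph.contains start then graph else graph.insert start []
        graph.modify start [] (fun l => l ++ [(number, e)]))
      PySem.Dict.empty
    = (sequence_number.map (fun n => (pvPrefix n, (n, pvSuffix n)))).foldl
        (fun d p => d.modify p.1 [] (fun l => l ++ [p.2])) PySem.Dict.empty := by
  rw [List.foldl_map]
  apply List.foldl_ext
  intro d n _
  exact (pv_step_eq d (pvPrefix n) _)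

-- B's append-accumulator fold is a map over the deduplicated prefixes.
theorem pv_alt_eq_map (sequence_number : List Int) :
    graph_dict_alt sequence_number
    = (PySem.Set.ofList (sequence_number.map (fun n => pvPrefix n))).map
        (fun pfx => (pfx,
          (sequence_number.filter (fun n => pvPrefix n == pfx)).map
            (fun n => (n, pvSuffix n)))) := by
  unfold graph_dict_alt
  rw [PySem.List.foldl_append_singleton_eq_map]
  simp

-- ===== VERDICT (by name: the statement is the Claim_ definition above) =====
theorem graph_dict_spec : Claim_equal_graph_dict := by
  intro seq _
  unfold Spec_graph_dict graph_dict
  rw [pv_fold_eq, pv_alt_eq_map]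
  set l := seq.map (fun n => (pvPrefix n, (n, pvSuffix n))) with hl
  have hnd : ((l.foldl (fun d p => d.modify p.1 [] (fun s => s ++ [p.2])) PySem.Dict.empty)).keys.Nodup := by
    exact PySem.Dict.nodup_keys_foldl_modify_key l (fun p => p.1) [] (fun _ p => (fun s => s ++ [p.2])) PySem.Dict.empty (by simp)
  rw [PySem.Dict.items_eq_map_keys _ hnd []]
  have hkeys : ((l.foldl (fun d p => d.modify p.1 [] (fun s => s ++ [p.2])) PySem.Dict.empty)).keys
      = PySem.Set.ofList (seq.map (fun n => pvPrefix n)) := by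
    rw [PySem.Dict.keys_foldl_modify_key l (fun p => p.1) [] (fun _ p => (fun s => s ++ [p.2])) PySem.Dict.empty]
    rw [hl, List.map_map]
    rfl
  rw [hkeys]
  apply List.map_congr_left
  intro pfx _
  have := PySem.Dict.getD_foldl_modify_append (l := l) (d := PySem.Dict.empty) (c := pfx)
  simp only [PySem.Dict.getD_empty, List.nil_append] at this
  rw [this, hl, List.filter_map]
  simp [Function.comp_def]
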